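-- pv_equiv track=rewrite | github.com/try918925/2024223 | OCR_TOOL/ocr.py | split_container_code
-- ===== SOURCE A (Python) =====
-- def split_container_code(full_code: str):
--     index = len(full_code)
--     for s in full_code[::-1]:
--         if s.isalpha():
--             break
--         index -= 1
--     if index == 0:
--         container_head, container_number = "", full_code
--     elif index == len(full_code):
--         container_head, container_number = full_code, ""
--     else:
--         container_head, container_number = full_code[:index], full_code[index:]
--     return container_head, container_number
-- ===== SOURCE B (Python) =====
-- def split_container_code(full_code: str):
--     # single forward pass tracking the last alphabetic position
--     last = -1
--     for i, ch in enumerate(full_code):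
--         if ch.isalpha():
--             last = i
--     index = last + 1
--     return full_code[:index], full_code[index:]
-- ===== Notes on version B (the rewrite author's own statement) =====
-- stated objective: simpler
-- what changed: B replaces A's backward scan over a reversed copy plus a three-branch tail with one forward pass tracking the last alphabetic index and a single unconditional pair of slices.
import Mathlib
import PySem

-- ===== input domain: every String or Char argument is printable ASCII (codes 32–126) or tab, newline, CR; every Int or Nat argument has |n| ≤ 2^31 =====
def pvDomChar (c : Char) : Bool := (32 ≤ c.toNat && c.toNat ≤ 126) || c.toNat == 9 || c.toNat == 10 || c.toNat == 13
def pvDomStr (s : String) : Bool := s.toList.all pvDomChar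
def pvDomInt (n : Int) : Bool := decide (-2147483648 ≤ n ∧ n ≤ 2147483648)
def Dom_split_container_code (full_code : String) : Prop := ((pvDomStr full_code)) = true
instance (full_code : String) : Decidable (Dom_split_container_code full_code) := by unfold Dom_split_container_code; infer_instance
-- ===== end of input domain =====

-- B replaces A's backward scan over a reversed copy plus a three-branch tail with one
-- forward pass tracking the last alphabetic index and one unconditional pair of slices.

-- ===== PORT A =====
-- A's loop: for s in full_code[::-1]: if s.isalpha(): break; index -= 1
def pvALoop : List Char → Int → Int
  | [], index => index
  | c :: rest, index => if PySem.Chars.isalpha c then index else pvALoop rest (index - 1)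

def split_container_code (full_code : String) : String × String :=
  -- full_code[::-1] is the reversed string (PySem.Str.slice?_none_none_neg_one)
  let index := pvALoop full_code.toList.reverse (PySem.Str.len full_code)
  if index = 0 then ("", full_code)
  else if index = PySem.Str.len full_code then (full_code, "")
  else (PySem.Str.slice full_code none (some index), PySem.Str.slice full_code (some index) none)

-- ===== PORT B =====
def split_container_code_alt (full_code : String) : String × String :=
  let last := (PySem.List.enumerate full_code.toList 0).foldl
    (fun acc p => if PySem.Chars.isalpha p.2 then p.1 else acc) (-1 : Int)
  let index := last + 1
  (PySem.Str.slice full_code none (some index), PySem.Str.slice full_code (some index) none)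

-- ===== PRECONDITION & SPEC =====
def Spec_split_container_code (full_code : String) (out : String × String) : Prop := out = split_container_code_alt full_code
instance (full_code : String) (out : String × String) : Decidable (Spec_split_container_code full_code out) := by unfold Spec_split_container_code; infer_instance

-- ===== CLAIM (what is proved, stated in full; the proofs are below) =====
def Claim_equal_split_container_code : Prop := ∀ (full_code : String), Dom_split_container_code full_code → Spec_split_container_code full_code (split_container_code full_code)

-- ===== LEMMAS AND PROOFS =====

def pvBLast (l : List Char) : Int :=
  (PySem.List.enumerate l 0).foldl (fun acc p => if PySem.Chars.isalpha p.2 then p.1 else acc) (-1 : Int)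

theorem pvBLast_bounds (l : List Char) : -1 ≤ pvBLast l ∧ pvBLast l < l.length := by
  induction l using List.reverseRecOn with
  | nil => simp [pvBLast, PySem.List.enumerate_nil]
  | append_singleton l c ih =>
    unfold pvBLast at *
    rw [PySem.List.enumerate_append]
    simp only [List.foldl_append, List.length_append, List.length_singleton,
      PySem.List.enumerate_cons, PySem.List.enumerate_nil, List.foldl_cons, List.foldl_nil,
      zero_add]
    split <;> push_cast <;> omega

-- A's backward countdown equals B's forward last-alpha tracker plus one.
theorem pvALoop_eq (l : List Char) : pvALoop l.reverse (l.length : Int) = pvBLast l + 1 := by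
  induction l using List.reverseRecOn with
  | nil => simp [pvALoop, pvBLast, PySem.List.enumerate_nil]
  | append_singleton l c ih =>
    unfold pvBLast at *
    rw [PySem.List.enumerate_append]
    simp only [List.reverse_append, List.reverse_singleton, List.singleton_append,
      List.length_append, List.length_singleton, List.foldl_append,
      PySem.List.enumerate_cons, PySem.List.enumerate_nil, List.foldl_cons, List.foldl_nil,
      zero_add, pvALoop]
    split
    · push_cast; ring
    · push_cast at *; simpa using ih

theorem pvSlicePair_zero (s : String) :
    (PySem.Str.slice s none (some 0), PySem.Str.slice s (some 0) none) = ("", s) := by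
  have h1 : (PySem.Str.slice s none (some 0)).toList = ([] : List Char) := by
    simp [pysem, PySem.List.slice_to (xs := s.toList) (b := 0) (by norm_num)]
  have h2 : (PySem.Str.slice s (some 0) none).toList = s.toList := by
    simp [pysem, PySem.List.slice_from (xs := s.toList) (a := 0) (by norm_num)]
  exact Prod.ext (String.toList_inj.mp (by simp [h1])) (String.toList_inj.mp h2)

theorem pvSlicePair_len (s : String) :
    (PySem.Str.slice s none (some (s.toList.length : Int)),
     PySem.Str.slice s (some (s.toList.length : Int)) none) = (s, "") := by
  have h1 : (PySem.Str.slice s none (some (s.toList.length : Int))).toList = s.toList := by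
    simp [pysem, PySem.List.slice_to_natCast]
  have h2 : (PySem.Str.slice s (some (s.toList.length : Int)) none).toList = ([] : List Char) := by
    simp [pysem, PySem.List.slice_from_natCast]
  exact Prod.ext (String.toList_inj.mp h1) (String.toList_inj.mp (by simp))

-- ===== VERDICT (by name: the statement is the Claim_ definition above) =====
theorem split_container_code_spec : Claim_equal_split_container_code := by
  intro s _
  show split_container_code s = split_container_code_alt s
  have hlen : PySem.Str.len s = (s.toList.length : Int) := by
    simp [PySem.Str.len_eq]
  simp only [split_container_code, split_container_code_alt]
  rw [hlen, pvALoop_eq]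
  simp only [pvBLast] at *
  have hb := pvBLast_bounds s.toList
  simp only [pvBLast] at hb
  by_cases h0 : (PySem.List.enumerate s.toList 0).foldl
      (fun acc p => if PySem.Chars.isalpha p.2 then p.1 else acc) (-1 : Int) + 1 = 0
  · rw [if_pos h0, h0, pvSlicePair_zero]
  · rw [if_neg h0]
    by_cases hl : (PySem.List.enumerate s.toList 0).foldl
        (fun acc p => if PySem.Chars.isalpha p.2 then p.1 else acc) (-1 : Int) + 1
        = (s.toList.length : Int)
    · rw [if_pos hl, hl, pvSlicePair_len]
    · rw [if_neg hl]
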